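-- pv_equiv track=rewrite | github.com/guilhermesilva19/ANI-Crawler | src/health_exclusions.py | get_health_url_priority
-- ===== SOURCE A (Python) =====
-- HIGH_PRIORITY_HEALTH_URLS = [
--     "https://www.health.gov.au/",
--     "https://www.health.gov.au/health-alerts",
--     "https://www.health.gov.au/health-topics",
--     "https://www.health.gov.au/our-work",
--     "https://www.health.gov.au/ministers/the-hon-mark-butler-mp",
--     "https://www.health.gov.au/about-us/contact-us",
--     "https://www.health.gov.au/resources",
--     "https://www.health.gov.au/initiatives-and-programs",
-- ]
--
-- MEDIUM_PRIORITY_HEALTH_URLS = [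
--     "https://www.health.gov.au/topics/medicare",
--     "https://www.health.gov.au/topics/mental-health",
--     "https://www.health.gov.au/topics/immunisation",
--     "https://www.health.gov.au/topics/aged-care",
--     "https://www.health.gov.au/topics/chronic-conditions",
--     "https://www.health.gov.au/topics/preventive-health",
-- ]
--
-- def get_health_url_priority(url: str) -> int:
--     """Get priority level for health.gov.au URLs (1=highest, 3=lowest)."""
--     url_lower = url.lower()
--
--     # Check high priority URLs
--     for priority_url in HIGH_PRIORITY_HEALTH_URLS:
--         if url_lower.startswith(priority_url.lower()):
--             return 1
--
--     # Check medium priority URLs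
--     for priority_url in MEDIUM_PRIORITY_HEALTH_URLS:
--         if url_lower.startswith(priority_url.lower()):
--             return 2
--
--     # Default to lower priority
--     return 3
-- ===== SOURCE B (Python) =====
-- ROOT = "https://www.health.gov.au/"
--
-- def get_health_url_priority(url: str) -> int:
--     """Get priority level for health.gov.au URLs (1=highest, 3=lowest)."""
--     # Every HIGH and MEDIUM prefix begins with the root, and the root itself is
--     # the first HIGH entry, so A returns 1 exactly when the URL starts with the
--     # root and 3 otherwise; the MEDIUM branch is unreachable.
--     return 1 if url.lower().startswith(ROOT) else 3
-- ===== Notes on version B (the rewrite author's own statement) =====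
-- stated objective: simpler
-- what changed: Replaces the two iterated prefix scans by a single closed-form check against the root prefix 'https://www.health.gov.au/': since every HIGH and MEDIUM prefix extends the root and the root is the first HIGH entry, A returns 1 iff the lowercased URL starts with the root (the MEDIUM branch is dead code), else 3.
import Mathlib
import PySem

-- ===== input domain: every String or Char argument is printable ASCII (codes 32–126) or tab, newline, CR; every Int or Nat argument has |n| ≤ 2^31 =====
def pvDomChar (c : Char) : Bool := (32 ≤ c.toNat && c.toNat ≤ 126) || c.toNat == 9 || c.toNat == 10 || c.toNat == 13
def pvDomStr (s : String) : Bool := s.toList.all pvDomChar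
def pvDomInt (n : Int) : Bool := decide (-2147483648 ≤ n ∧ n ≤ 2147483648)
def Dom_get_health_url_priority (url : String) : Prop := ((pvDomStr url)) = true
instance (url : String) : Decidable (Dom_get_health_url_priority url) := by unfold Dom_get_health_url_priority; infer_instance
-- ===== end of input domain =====

-- B replaces A's two list scans by one closed-form check against the root prefix
-- (every listed prefix extends the root, so A's answer is 1 iff the URL starts with it, else 3).

-- ===== PORT A =====
def HIGH_PRIORITY_HEALTH_URLS : List String := [
  "https://www.health.gov.au/",
  "https://www.health.gov.au/health-alerts",
  "https://www.health.gov.au/health-topics",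
  "https://www.health.gov.au/our-work",
  "https://www.health.gov.au/ministers/the-hon-mark-butler-mp",
  "https://www.health.gov.au/about-us/contact-us",
  "https://www.health.gov.au/resources",
  "https://www.health.gov.au/initiatives-and-programs"]

def MEDIUM_PRIORITY_HEALTH_URLS : List String := [
  "https://www.health.gov.au/topics/medicare",
  "https://www.health.gov.au/topics/mental-health",
  "https://www.health.gov.au/topics/immunisation",
  "https://www.health.gov.au/topics/aged-care",
  "https://www.health.gov.au/topics/chronic-conditions",
  "https://www.health.gov.au/topics/preventive-health"]

-- the 'for priority_url in …: if url_lower.startswith(priority_url.lower()): return r' loop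
def pvScan (url_lower : String) : List String → Bool
  | [] => false
  | p :: rest =>
      if PySem.Str.startswith url_lower (PySem.Str.lower p) then true
      else pvScan url_lower rest

def get_health_url_priority (url : String) : Int :=
  let url_lower := PySem.Str.lower url
  if pvScan url_lower HIGH_PRIORITY_HEALTH_URLS then 1
  else if pvScan url_lower MEDIUM_PRIORITY_HEALTH_URLS then 2
  else 3

-- ===== PORT B =====
def pvROOT : String := "https://www.health.gov.au/"

def get_health_url_priority_alt (url : String) : Int :=
  if PySem.Str.startswith (PySem.Str.lower url) pvROOT then 1 else 3

-- ===== PRECONDITION & SPEC =====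
def Spec_get_health_url_priority (url : String) (out : Int) : Prop := out = get_health_url_priority_alt url
instance (url : String) (out : Int) : Decidable (Spec_get_health_url_priority url out) := by unfold Spec_get_health_url_priority; infer_instance

-- ===== CLAIM (what is proved, stated in full; the proofs are below) =====
def Claim_equal_get_health_url_priority : Prop := ∀ (url : String), Dom_get_health_url_priority url → Spec_get_health_url_priority url (get_health_url_priority url)

-- ===== LEMMAS AND PROOFS =====

-- every prefix in both lists extends the root (checked computationally on the literals)
lemma pvRoot_prefix_all :
    ∀ p ∈ HIGH_PRIORITY_HEALTH_URLS ++ MEDIUM_PRIORITY_HEALTH_URLS,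
      pvROOT.toList <+: (PySem.Chars.lower p.toList) := by decide

-- if the lowered url does not start with the root, no listed prefix matches
lemma pvScan_false (u : String)
    (h : ¬ pvROOT.toList <+: u.toList)
    (l : List String)
    (hl : ∀ p ∈ l, pvROOT.toList <+: (PySem.Chars.lower p.toList)) :
    pvScan u l = false := by
  induction l with
  | nil => rfl
  | cons p rest ih =>
      have hp : pvROOT.toList <+: (PySem.Chars.lower p.toList) := hl p (by simp)
      have hrest : ∀ q ∈ rest, pvROOT.toList <+: (PySem.Chars.lower q.toList) :=
        fun q hq => hl q (by simp [hq])
      have hmatch : PySem.Chars.startswith u.toList (PySem.Chars.lower p.toList) = false := by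
        by_contra hne
        have htrue : PySem.Chars.startswith u.toList (PySem.Chars.lower p.toList) = true := by
          cases hb : PySem.Chars.startswith u.toList (PySem.Chars.lower p.toList) <;> simp_all
        exact h (hp.trans (by simpa [PySem.Chars.startswith_iff] using htrue))
      simp [pvScan, hmatch, ih hrest]

-- ===== VERDICT (by name: the statement is the Claim_ definition above) =====
theorem get_health_url_priority_spec : Claim_equal_get_health_url_priority := by
  intro url _
  unfold Spec_get_health_url_priority get_health_url_priority get_health_url_priority_alt
  by_cases hroot : pvROOT.toList <+: (PySem.Str.lower url).toList
  · -- the root is the first HIGH entry, so the high scan succeeds immediately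
    have hsw : PySem.Str.startswith (PySem.Str.lower url) pvROOT = true := by
      simpa [PySem.Chars.startswith_iff] using hroot
    have hfirst : PySem.Str.lower "https://www.health.gov.au/" = pvROOT := by decide
    have hscan : pvScan (PySem.Str.lower url) HIGH_PRIORITY_HEALTH_URLS = true := by
      unfold HIGH_PRIORITY_HEALTH_URLS pvScan
      rw [hfirst, if_pos hsw]
    simp only [hscan, if_true]
    simpa [PySem.Chars.startswith_iff] using hroot
  · have hsw : PySem.Str.startswith (PySem.Str.lower url) pvROOT = false := by
      rw [Bool.eq_false_iff]
      simpa [PySem.Chars.startswith_iff] using hroot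
    have hH : pvScan (PySem.Str.lower url) HIGH_PRIORITY_HEALTH_URLS = false :=
      pvScan_false _ hroot _ (fun p hp => pvRoot_prefix_all p (by simp [hp]))
    have hM : pvScan (PySem.Str.lower url) MEDIUM_PRIORITY_HEALTH_URLS = false :=
      pvScan_false _ hroot _ (fun p hp => pvRoot_prefix_all p (by simp [hp]))
    simp only [hH, hM, if_false, Bool.false_eq_true]
    simp only [PySem.Str.startswith_eq, PySem.Str.toList_lower] at hsw
    simp [hsw]
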